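-- pv_equiv track=rewrite | github.com/stijndcl/didier | cogs/train.py | formatCity
-- ===== SOURCE A (Python) =====
-- def formatCity(city):
--     city = city[0].upper() + city[1:]
--     arr = []
--     for i, letter in enumerate(city):
--         if (i > 0 and (city[i - 1] == " " or city[i - 1] == "-")) or i == 0:
--             arr.append(letter.upper())
--         else:
--             arr.append(letter.lower())
--     return "".join(arr)
-- ===== SOURCE B (Python) =====
-- def formatCity(city):
--     return " ".join(
--         "-".join(part.capitalize() for part in word.split("-"))
--         for word in city.split(" ")
--     )
-- ===== Notes on version B (the rewrite author's own statement) =====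
-- stated objective: idiomatic
-- what changed: A scans characters in a Python-level loop with an index-based previous-character test; B splits the city on the space and hyphen delimiters, capitalizes every sub-token with str.capitalize(), and rejoins them, moving the per-character work into C-level str methods.
import Mathlib
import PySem

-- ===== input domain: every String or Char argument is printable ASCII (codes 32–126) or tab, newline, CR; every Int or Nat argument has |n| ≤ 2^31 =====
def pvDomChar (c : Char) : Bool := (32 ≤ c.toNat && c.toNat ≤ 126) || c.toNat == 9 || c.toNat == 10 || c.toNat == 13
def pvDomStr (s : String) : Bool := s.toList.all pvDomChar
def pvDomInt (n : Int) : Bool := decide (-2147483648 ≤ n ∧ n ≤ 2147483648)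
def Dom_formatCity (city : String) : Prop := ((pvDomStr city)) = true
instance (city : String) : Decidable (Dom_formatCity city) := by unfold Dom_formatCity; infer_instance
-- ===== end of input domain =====

-- B re-implements A by splitting on the delimiters and capitalizing each token instead of
-- scanning characters with a previous-character test; return values agree on every non-empty input.

-- ===== PORT A =====
def formatCity (city : String) : String :=
  let cs := city.toList
  -- city = city[0].upper() + city[1:]   (city[0] raises IndexError on "": excluded by Pre_; the none arm is unreachable there)
  let cs2 := (match PySem.List.pyGet? cs 0 with
              | some c => PySem.Chars.upper [c]
              | none => []) ++ PySem.List.slice cs (some 1) none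
  let arr := (PySem.List.enumerate cs2).foldl
    (fun (arr : List (List Char)) (p : Int × Char) =>
      if (decide (p.1 > 0) && (PySem.List.pyGetD cs2 (p.1 - 1) ' ' == ' ' || PySem.List.pyGetD cs2 (p.1 - 1) ' ' == '-')) || (p.1 == 0)
      then arr ++ [PySem.Chars.upper [p.2]]
      else arr ++ [PySem.Chars.lower [p.2]])
    []
  String.ofList (PySem.Chars.join [] arr)

-- ===== PORT B =====
-- str.capitalize(): first char title-cased (= upper on ASCII), the rest lowered; exact on the ASCII domain
def pyCapitalize (w : List Char) : List Char :=
  match w with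
  | [] => []
  | c :: rest => PySem.Chars.upperChar c :: PySem.Chars.lower rest

def formatCity_alt (city : String) : String :=
  String.ofList (PySem.Chars.join [' ']
    ((PySem.Chars.splitOn city.toList [' ']).map (fun w =>
      PySem.Chars.join ['-'] ((PySem.Chars.splitOn w ['-']).map pyCapitalize))))

-- ===== PRECONDITION & SPEC =====
-- Pre_ excludes only the empty string, on which A raises IndexError (city[0]).
def Pre_formatCity (city : String) : Prop := city ≠ ""
instance (city : String) : Decidable (Pre_formatCity city) := by unfold Pre_formatCity; infer_instance
def pvWitness_formatCity : String := "gent"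

def Spec_formatCity (city : String) (out : String) : Prop := out = formatCity_alt city
instance (city : String) (out : String) : Decidable (Spec_formatCity city out) := by unfold Spec_formatCity; infer_instance

-- ===== CLAIM (what is proved, stated in full; the proofs are below) =====
def Claim_equal_formatCity : Prop := ∀ (city : String), Dom_formatCity city → Pre_formatCity city → Spec_formatCity city (formatCity city)

-- ===== LEMMAS AND PROOFS =====

-- Char toolkit
theorem charLe (a c : Char) : (a ≤ c) ↔ a.toNat ≤ c.toNat := by
  rw [Char.le_def, UInt32.le_iff_toNat_le]; rfl

theorem charEq (a c : Char) : (a = c) ↔ a.toNat = c.toNat := by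
  rw [Char.ext_iff, ← UInt32.toNat_inj]; rfl

theorem toNat_ofNat' (n : Nat) (h : Nat.isValidChar n) : (Char.ofNat n).toNat = n := by
  unfold Char.ofNat Char.toNat
  rw [dif_pos h]
  rfl

theorem upperChar_idem (c : Char) : PySem.Chars.upperChar (PySem.Chars.upperChar c) = PySem.Chars.upperChar c := by
  unfold PySem.Chars.upperChar PySem.Chars.islower
  split_ifs with h1 h2 <;> try rfl
  exfalso
  simp only [Bool.and_eq_true, decide_eq_true_eq, charLe, show ('a').toNat = 97 from rfl,
    show ('z').toNat = 122 from rfl] at h1 h2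
  rw [toNat_ofNat' _ (Or.inl (by omega))] at h2
  omega

def isDelim (c : Char) : Bool := c == ' ' || c == '-'

theorem isDelim_upperChar (c : Char) : isDelim (PySem.Chars.upperChar c) = isDelim c := by
  unfold isDelim PySem.Chars.upperChar PySem.Chars.islower
  split_ifs with h1
  · simp only [Bool.and_eq_true, decide_eq_true_eq, charLe, show ('a').toNat = 97 from rfl,
      show ('z').toNat = 122 from rfl] at h1
    have h32 : (Char.ofNat (c.toNat - 32)).toNat = c.toNat - 32 := toNat_ofNat' _ (Or.inl (by omega))
    rw [Bool.eq_iff_iff]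
    simp only [Bool.or_eq_true, beq_iff_eq, charEq, h32, show (' ').toNat = 32 from rfl,
      show ('-').toNat = 45 from rfl]
    omega
  · rfl

theorem upperChar_of_delim {c : Char} (h : isDelim c = true) : PySem.Chars.upperChar c = c := by
  unfold isDelim at h
  rcases Bool.or_eq_true_iff.mp h with h | h <;> rw [beq_iff_eq.mp h] <;> rfl

theorem lowerChar_of_delim {c : Char} (h : isDelim c = true) : PySem.Chars.lowerChar c = c := by
  unfold isDelim at h
  rcases Bool.or_eq_true_iff.mp h with h | h <;> rw [beq_iff_eq.mp h] <;> rfl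

-- The common specification: capitalize exactly the characters that follow a delimiter
-- (the Bool state is 'previous character was a delimiter / start of string').
def bSpec : Bool → List Char → List Char
  | _, [] => []
  | b, c :: cs =>
    (if isDelim c then c else if b then PySem.Chars.upperChar c else PySem.Chars.lowerChar c)
      :: bSpec (isDelim c) cs

-- single-character split, structurally
def mySplit (d : Char) : List Char → List (List Char)
  | [] => [[]]
  | c :: cs =>
    if c == d then [] :: mySplit d cs
    else match mySplit d cs with
         | [] => [[c]]
         | w :: ws => (c :: w) :: ws

theorem mySplit_ne_nil (d : Char) (l : List Char) : mySplit d l ≠ [] := by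
  cases l with
  | nil => simp [mySplit]
  | cons c cs =>
    unfold mySplit
    split_ifs <;> simp
    split <;> simp

theorem splitOn_go_eq (d : Char) : ∀ (fuel : Nat) (l cur : List Char) (acc : List (List Char)),
    l.length < fuel →
    PySem.Chars.splitOn.go [d] fuel l cur acc =
      acc.reverse ++ (match mySplit d l with
                      | [] => [cur.reverse]
                      | w :: ws => (cur.reverse ++ w) :: ws) := by
  intro fuel
  induction fuel with
  | zero => intro l cur acc h; omega
  | succ n ih =>
    intro l cur acc h
    cases l with
    | nil => simp [PySem.Chars.splitOn.go, mySplit]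
    | cons c rest =>
      rw [PySem.Chars.splitOn.go]
      by_cases hc : c = d
      · have hpre : [d].isPrefixOf (c :: rest) = true := by simp [List.isPrefixOf, hc]
        rw [if_pos hpre]
        simp only [List.length_cons, List.length_nil, Nat.zero_add, List.drop_succ_cons, List.drop_zero]
        rw [ih rest [] (cur.reverse :: acc) (by simp at h ⊢; omega)]
        simp only [mySplit, if_pos (beq_iff_eq.mpr hc)]
        rcases hsp : mySplit d rest with _ | ⟨w, ws⟩
        · exact absurd hsp (mySplit_ne_nil d rest)
        · simp
      · have hpre : [d].isPrefixOf (c :: rest) = false := by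
          simp only [List.isPrefixOf, Bool.and_eq_false_iff, beq_eq_false_iff_ne, ne_eq]
          exact Or.inl (fun h => hc h.symm)
        rw [if_neg (by simp [hpre])]
        rw [ih rest (c :: cur) acc (by simp at h ⊢; omega)]
        simp only [mySplit, if_neg (by simp [hc] : ¬ (c == d) = true)]
        rcases hsp : mySplit d rest with _ | ⟨w, ws⟩
        · exact absurd hsp (mySplit_ne_nil d rest)
        · simp

theorem splitOn_single (d : Char) (l : List Char) : PySem.Chars.splitOn l [d] = mySplit d l := by
  unfold PySem.Chars.splitOn
  rw [splitOn_go_eq d (l.length + 1) l [] [] (by omega)]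
  rcases hsp : mySplit d l with _ | ⟨w, ws⟩
  · exact absurd hsp (mySplit_ne_nil d l)
  · simp

-- join sep ((x ++ y) :: l) peels x off the head
theorem join_head_append (sep x y : List Char) (l : List (List Char)) :
    PySem.Chars.join sep ((x ++ y) :: l) = x ++ PySem.Chars.join sep (y :: l) := by
  cases l with
  | nil => rw [PySem.Chars.join_singleton, PySem.Chars.join_singleton]
  | cons q rest =>
    rw [PySem.Chars.join_cons_cons, PySem.Chars.join_cons_cons]
    simp [List.append_assoc]

-- ===== B-side characterization =====
def gfun (w : List Char) : List Char :=
  PySem.Chars.join ['-'] ((mySplit '-' w).map pyCapitalize)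

def lowcap (w : List Char) : List Char :=
  match mySplit '-' w with
  | [] => []
  | p :: ps => PySem.Chars.join ['-'] (PySem.Chars.lower p :: ps.map pyCapitalize)

theorem gfun_nil : gfun [] = [] := by rfl
theorem lowcap_nil : lowcap [] = [] := by rfl

theorem gfun_cons_dash (w : List Char) : gfun ('-' :: w) = '-' :: gfun w := by
  rcases hsp : mySplit '-' w with _ | ⟨p, ps⟩
  · exact absurd hsp (mySplit_ne_nil '-' w)
  · simp only [gfun, mySplit, if_pos (by rfl : ('-' == '-') = true), hsp, List.map_cons,
      PySem.Chars.join_cons_cons]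
    simp [pyCapitalize]

theorem lowcap_cons_dash (w : List Char) : lowcap ('-' :: w) = '-' :: gfun w := by
  rcases hsp : mySplit '-' w with _ | ⟨p, ps⟩
  · exact absurd hsp (mySplit_ne_nil '-' w)
  · simp only [lowcap, gfun, mySplit, if_pos (by rfl : ('-' == '-') = true), hsp, List.map_cons,
      PySem.Chars.join_cons_cons]
    simp [PySem.Chars.lower]

theorem gfun_cons (c : Char) (w : List Char) (hc : c ≠ '-') :
    gfun (c :: w) = PySem.Chars.upperChar c :: lowcap w := by
  rcases hsp : mySplit '-' w with _ | ⟨p, ps⟩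
  · exact absurd hsp (mySplit_ne_nil '-' w)
  · simp only [gfun, lowcap, mySplit, if_neg (by simp [hc] : ¬ (c == '-') = true), hsp,
      List.map_cons]
    rw [show pyCapitalize (c :: p) = [PySem.Chars.upperChar c] ++ PySem.Chars.lower p by
      simp [pyCapitalize], join_head_append]
    rfl

theorem lowcap_cons (c : Char) (w : List Char) (hc : c ≠ '-') :
    lowcap (c :: w) = PySem.Chars.lowerChar c :: lowcap w := by
  rcases hsp : mySplit '-' w with _ | ⟨p, ps⟩
  · exact absurd hsp (mySplit_ne_nil '-' w)
  · simp only [lowcap, mySplit, if_neg (by simp [hc] : ¬ (c == '-') = true), hsp]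
    rw [show PySem.Chars.lower (c :: p) = [PySem.Chars.lowerChar c] ++ PySem.Chars.lower p by
      simp [PySem.Chars.lower], join_head_append]
    rfl

def BJ (cs : List Char) : List Char :=
  PySem.Chars.join [' '] ((mySplit ' ' cs).map gfun)

def LJ (cs : List Char) : List Char :=
  match mySplit ' ' cs with
  | [] => []
  | w :: ws => PySem.Chars.join [' '] (lowcap w :: ws.map gfun)

theorem bMain (cs : List Char) : BJ cs = bSpec true cs ∧ LJ cs = bSpec false cs := by
  induction cs with
  | nil =>
    constructor
    · rw [show BJ [] = [] from rfl]; rfl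
    · rw [show LJ [] = [] from rfl]; rfl
  | cons c cs ih =>
    obtain ⟨hB, hL⟩ := ih
    rcases hsp : mySplit ' ' cs with _ | ⟨w, ws⟩
    · exact absurd hsp (mySplit_ne_nil ' ' cs)
    by_cases hspace : c = ' '
    · subst hspace
      have hBs : BJ (' ' :: cs) = ' ' :: BJ cs := by
        simp only [BJ, mySplit, if_pos (by rfl : (' ' == ' ') = true), hsp, List.map_cons,
          PySem.Chars.join_cons_cons, gfun_nil]
        rfl
      have hLs : LJ (' ' :: cs) = ' ' :: BJ cs := by
        simp only [LJ, BJ, mySplit, if_pos (by rfl : (' ' == ' ') = true), hsp, List.map_cons,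
          PySem.Chars.join_cons_cons, lowcap_nil]
        rfl
      refine ⟨?_, ?_⟩ <;>
        simp only [hBs, hLs, hB, bSpec, isDelim, show ((' ' == ' ' || ' ' == '-')) = true from rfl,
          if_pos] <;> rfl
    · have hsplit : mySplit ' ' (c :: cs) = (c :: w) :: ws := by
        simp only [mySplit, if_neg (by simp [hspace] : ¬ (c == ' ') = true), hsp]
      by_cases hdash : c = '-'
      · subst hdash
        have hBs : BJ ('-' :: cs) = '-' :: BJ cs := by
          simp only [BJ, hsplit, hsp, List.map_cons, gfun_cons_dash]
          rw [show ('-' :: gfun w) :: List.map gfun ws = (['-'] ++ gfun w) :: List.map gfun ws from rfl,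
            join_head_append]
          rfl
        have hLs : LJ ('-' :: cs) = '-' :: BJ cs := by
          simp only [LJ, BJ, hsplit, hsp, List.map_cons, lowcap_cons_dash]
          rw [show ('-' :: gfun w) :: List.map gfun ws = (['-'] ++ gfun w) :: List.map gfun ws from rfl,
            join_head_append]
          rfl
        refine ⟨?_, ?_⟩ <;>
          simp only [hBs, hLs, hB, bSpec, isDelim, show (('-' == ' ' || '-' == '-')) = true from rfl,
            if_pos] <;> rfl
      · have hdelim : isDelim c = false := by
          unfold isDelim
          simp [hspace, hdash]
        have hBs : BJ (c :: cs) = PySem.Chars.upperChar c :: LJ cs := by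
          simp only [BJ, LJ, hsplit, hsp, List.map_cons, gfun_cons c w hdash]
          rw [show (PySem.Chars.upperChar c :: lowcap w) :: List.map gfun ws
              = ([PySem.Chars.upperChar c] ++ lowcap w) :: List.map gfun ws from rfl,
            join_head_append]
          rfl
        have hLs : LJ (c :: cs) = PySem.Chars.lowerChar c :: LJ cs := by
          simp only [LJ, hsplit, hsp, lowcap_cons c w hdash]
          rw [show (PySem.Chars.lowerChar c :: lowcap w) :: List.map gfun ws
              = ([PySem.Chars.lowerChar c] ++ lowcap w) :: List.map gfun ws from rfl,
            join_head_append]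
          rfl
        refine ⟨?_, ?_⟩ <;>
          simp only [hBs, hLs, hL, bSpec, hdelim, Bool.false_eq_true, if_false, if_true] <;> rfl

theorem formatCity_alt_eq (city : String) :
    formatCity_alt city = String.ofList (bSpec true city.toList) := by
  unfold formatCity_alt
  rw [splitOn_single]
  have : (fun w => PySem.Chars.join ['-'] ((PySem.Chars.splitOn w ['-']).map pyCapitalize)) = gfun := by
    funext w
    rw [splitOn_single]
    rfl
  rw [this, show PySem.Chars.join [' '] ((mySplit ' ' city.toList).map gfun) = BJ city.toList from rfl,
    (bMain city.toList).1]

-- ===== A-side characterization =====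
theorem loopA (xs : List Char) :
    ∀ (suf : List Char) (k : Nat) (prev : Char) (acc : List (List Char)),
      1 ≤ k → xs.drop k = suf → xs[k-1]? = some prev →
      (PySem.List.enumerate suf (k : Int)).foldl
        (fun (arr : List (List Char)) (p : Int × Char) =>
          if (decide (p.1 > 0) && (PySem.List.pyGetD xs (p.1 - 1) ' ' == ' ' || PySem.List.pyGetD xs (p.1 - 1) ' ' == '-')) || (p.1 == 0)
          then arr ++ [PySem.Chars.upper [p.2]]
          else arr ++ [PySem.Chars.lower [p.2]]) acc
      = acc ++ (bSpec (isDelim prev) suf).map (fun c => [c]) := by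
  intro suf
  induction suf with
  | nil => intro k prev acc _ _ _; simp [PySem.List.enumerate, bSpec]
  | cons c rest ih =>
    intro k prev acc hk hdrop hget
    rw [PySem.List.enumerate_cons, List.foldl_cons]
    have hpos : decide ((k : Int) > 0) = true := by simp; omega
    have hzero : ((k : Int) == 0) = false := by simp; omega
    have hidx : PySem.List.pyGetD xs ((k : Int) - 1) ' ' = prev := by
      have : ((k : Int) - 1) = ((k - 1 : Nat) : Int) := by push_cast [Nat.cast_sub hk]; ring
      rw [this, PySem.List.pyGetD_natCast, List.getD_eq_getElem?_getD, hget]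
      rfl
    have hcond : ((decide ((k : Int) > 0) && (PySem.List.pyGetD xs ((k : Int) - 1) ' ' == ' ' || PySem.List.pyGetD xs ((k : Int) - 1) ' ' == '-')) || ((k : Int) == 0)) = isDelim prev := by
      rw [hpos, hzero, hidx, Bool.true_and, Bool.or_false]
      rfl
    have hget' : xs[k]? = some c := by
      have h0 : (xs.drop k)[0]? = some c := by rw [hdrop]; rfl
      rw [List.getElem?_drop] at h0
      simpa using h0
    have hdrop' : xs.drop (k+1) = rest := by
      have : xs.drop (k+1) = (xs.drop k).drop 1 := by rw [List.drop_drop]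
      rw [this, hdrop]
      rfl
    have hrec := fun (acc' : List (List Char)) => ih (k+1) c acc' (by omega) hdrop' (by simpa using hget')
    have hcast : ((k : Int) + 1) = (((k+1 : Nat)) : Int) := by push_cast; ring
    rcases hd : isDelim prev with _ | _
    · -- prev not a delimiter: lower branch
      simp only [hcond, hd, Bool.false_eq_true, if_false]
      rw [hcast, hrec _]
      simp only [bSpec, List.map_cons, List.append_assoc, List.cons_append, List.nil_append]
      congr 2
      rcases hdc : isDelim c with _ | _
      · simp [PySem.Chars.lower, hdc]
      · simp [PySem.Chars.lower, hdc, lowerChar_of_delim hdc]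
    · -- prev a delimiter: upper branch
      simp only [hcond, hd, if_true]
      rw [hcast, hrec _]
      simp only [bSpec, List.map_cons, List.append_assoc, List.cons_append, List.nil_append]
      congr 2
      rcases hdc : isDelim c with _ | _
      · simp [PySem.Chars.upper, hdc]
      · simp [PySem.Chars.upper, hdc, upperChar_of_delim hdc]

theorem formatCity_eq (city : String) (c : Char) (rest : List Char) (h : city.toList = c :: rest) :
    formatCity city = String.ofList (bSpec true (c :: rest)) := by
  unfold formatCity
  rw [h]
  have hget0 : PySem.List.pyGet? (c :: rest) (0 : Int) = some c := by
    simp [PySem.List.pyGet?, PySem.List.pyIdx?]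
  have hslice : PySem.List.slice (c :: rest) (some 1) none = rest := by
    rw [PySem.List.slice_from_one]; rfl
  simp only [hget0, hslice]
  have hcs2 : PySem.Chars.upper [c] ++ rest = PySem.Chars.upperChar c :: rest := by
    simp [PySem.Chars.upper]
  rw [hcs2]
  rw [show PySem.List.enumerate (PySem.Chars.upperChar c :: rest) = PySem.List.enumerate (PySem.Chars.upperChar c :: rest) 0 from rfl]
  rw [PySem.List.enumerate_cons, List.foldl_cons]
  have hcond0 : ((decide ((0:Int) > 0) && (PySem.List.pyGetD (PySem.Chars.upperChar c :: rest) ((0:Int) - 1) ' ' == ' ' || PySem.List.pyGetD (PySem.Chars.upperChar c :: rest) ((0:Int) - 1) ' ' == '-')) || ((0:Int) == 0)) = true := by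
    simp
  rw [if_pos hcond0]
  have hfirst : ([] : List (List Char)) ++ [PySem.Chars.upper [PySem.Chars.upperChar c]] = [[PySem.Chars.upperChar c]] := by
    simp [PySem.Chars.upper, upperChar_idem]
  rw [hfirst]
  have hrec := loopA (PySem.Chars.upperChar c :: rest) rest 1 (PySem.Chars.upperChar c)
    [[PySem.Chars.upperChar c]] (by omega) (by rfl) (by rfl)
  rw [show ((0:Int) + 1) = ((1:Nat) : Int) from rfl, hrec, isDelim_upperChar]
  rw [show [[PySem.Chars.upperChar c]] ++ List.map (fun c => [c]) (bSpec (isDelim c) rest)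
      = List.map (fun c => [c]) (PySem.Chars.upperChar c :: bSpec (isDelim c) rest) from rfl,
    PySem.Chars.join_nil_singletons]
  congr 1
  rcases hdc : isDelim c with _ | _
  · simp only [bSpec, hdc, Bool.false_eq_true, if_false, if_true]
  · simp only [bSpec, hdc, if_true, upperChar_of_delim hdc]

-- ===== VERDICT (by name: the statement is the Claim_ definition above) =====
theorem formatCity_spec : Claim_equal_formatCity := by
  intro city _ hpre
  unfold Spec_formatCity
  rcases h : city.toList with _ | ⟨c, rest⟩
  · exact absurd (String.toList_eq_nil_iff.mp h) hpre
  · rw [formatCity_eq city c rest h, formatCity_alt_eq, h]
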